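-- pv_equiv track=rewrite | github.com/ricosjp/monolish | test/logger/logging/logger.py | grouping_1st_layer
-- ===== SOURCE A (Python) =====
-- def grouping_1st_layer(target_dict_list):
--     solver_dict_list = list(filter(lambda x:"solve/" in x["name"], target_dict_list))
--     other_dict_list = list(filter(lambda x:"solve/" not in x["name"], target_dict_list))
--
--     filter_list = list(map(lambda x:(("stat" in x) and x["stat"] == "IN" and x["name"] == "solve/"), solver_dict_list))
--     split_index_list = [i for i, x in enumerate(filter_list) if x == True] + [len(filter_list)]
--     solver_dict_block_list = [solver_dict_list[split_index_list[i]: split_index_list[i+1]] for i in range(len(split_index_list)-1)]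
--
--     block_dict_lists = [other_dict_list] + solver_dict_block_list
--     title_list = ["other"] + [f"solver {str(i)}" for i in range(len(solver_dict_block_list))]
--     return title_list, block_dict_lists
-- ===== SOURCE B (Python) =====
-- def grouping_1st_layer(target_dict_list):
--     other_list = []
--     blocks = []
--     current = []
--     started = False
--     for x in target_dict_list:
--         if "solve/" not in x["name"]:
--             other_list.append(x)
--         elif ("stat" in x) and x["stat"] == "IN" and x["name"] == "solve/":
--             if started:
--                 blocks.append(current)
--             current = [x]
--             started = True
--         elif started:
--             current.append(x)
--     if started:
--         blocks.append(current)
--     title_list = ["other"] + ["solver " + str(i) for i in range(len(blocks))]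
--     return title_list, [other_list] + blocks
-- ===== Notes on version B (the rewrite author's own statement) =====
-- stated objective: alternative
-- what changed: Replaces A's three passes (two filters plus a map) and the enumerate/split-index/slice arithmetic by a single pass over the input that classifies each dict and maintains a started flag with a current-block accumulator.
import Mathlib
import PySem

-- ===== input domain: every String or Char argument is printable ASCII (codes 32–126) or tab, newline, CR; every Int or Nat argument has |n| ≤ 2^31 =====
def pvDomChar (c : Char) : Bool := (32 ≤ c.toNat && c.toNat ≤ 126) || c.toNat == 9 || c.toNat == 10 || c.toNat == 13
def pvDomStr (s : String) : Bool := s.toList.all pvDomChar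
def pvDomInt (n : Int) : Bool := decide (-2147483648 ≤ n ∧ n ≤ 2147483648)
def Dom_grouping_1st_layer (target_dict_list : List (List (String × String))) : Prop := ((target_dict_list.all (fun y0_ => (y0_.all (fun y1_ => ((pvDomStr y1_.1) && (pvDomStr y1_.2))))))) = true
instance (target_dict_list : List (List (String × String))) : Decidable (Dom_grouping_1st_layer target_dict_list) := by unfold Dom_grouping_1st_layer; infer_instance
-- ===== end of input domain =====

-- B replaces A's three list passes plus index/slice arithmetic by ONE pass with a started/current-block
-- accumulator (objective: alternative decomposition, same asymptotic cost).

-- shared helpers (both Pythons evaluate these same expressions on a dict x)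
def pvName (x : List (String × String)) : String := ((PySem.Dict.mk x).get? "name").getD ""
def pvIsSolver (x : List (String × String)) : Bool := PySem.Str.isIn "solve/" (pvName x)
def pvIsMarker (x : List (String × String)) : Bool :=
  (PySem.Dict.mk x).contains "stat" && (((PySem.Dict.mk x).get? "stat").getD "" == "IN") && (pvName x == "solve/")

-- ===== PORT A =====
def grouping_1st_layer (target_dict_list : List (List (String × String))) : List String × (List (List (List (String × String)))) :=
  let solver_dict_list := target_dict_list.filter (fun x => pvIsSolver x)
  let other_dict_list := target_dict_list.filter (fun x => !pvIsSolver x)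
  let filter_list := solver_dict_list.map (fun x => pvIsMarker x)
  let split_index_list := ((PySem.List.enumerate filter_list 0).filter (fun p => p.2 == true)).map (fun p => p.1) ++ [(filter_list.length : Int)]
  let solver_dict_block_list := (PySem.List.pyRange 0 ((split_index_list.length : Int) - 1) 1).map
      (fun i => PySem.List.slice solver_dict_list (some (PySem.List.pyGetD split_index_list i 0)) (some (PySem.List.pyGetD split_index_list (i + 1) 0)))
  let block_dict_lists := [other_dict_list] ++ solver_dict_block_list
  let title_list := ["other"] ++ (PySem.List.pyRange 0 ((solver_dict_block_list.length : Int)) 1).map (fun i => "solver " ++ PySem.Int.toStr i)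
  (title_list, block_dict_lists)

-- ===== PORT B =====
def grouping_1st_layer_alt (target_dict_list : List (List (String × String))) : List String × (List (List (List (String × String)))) :=
  let st := target_dict_list.foldl
    (fun (st : List (List (String × String)) × List (List (List (String × String))) × List (List (String × String)) × Bool) x =>
      if !pvIsSolver x then (st.1 ++ [x], st.2.1, st.2.2.1, st.2.2.2)
      else if pvIsMarker x then (st.1, (if st.2.2.2 then st.2.1 ++ [st.2.2.1] else st.2.1), [x], true)
      else if st.2.2.2 then (st.1, st.2.1, st.2.2.1 ++ [x], st.2.2.2)
      else st) ([], [], [], false)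
  let blocks := if st.2.2.2 then st.2.1 ++ [st.2.2.1] else st.2.1
  let title_list := ["other"] ++ (PySem.List.pyRange 0 ((blocks.length : Int)) 1).map (fun i => "solver " ++ PySem.Int.toStr i)
  (title_list, [st.1] ++ blocks)

-- ===== PRECONDITION & SPEC =====
-- Pre_ excludes exactly the dicts without a "name" key, on which Python A raises KeyError (B raises too).
def Pre_grouping_1st_layer (target_dict_list : List (List (String × String))) : Prop :=
  ∀ x ∈ target_dict_list, (PySem.Dict.mk x).contains "name" = true
instance (target_dict_list : List (List (String × String))) : Decidable (Pre_grouping_1st_layer target_dict_list) := by unfold Pre_grouping_1st_layer; infer_instance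
def pvWitness_grouping_1st_layer : (List (List (String × String))) :=
  [[("name", "solve/"), ("stat", "IN")], [("name", "setup")], [("name", "solve/spmv")]]
def Spec_grouping_1st_layer (target_dict_list : List (List (String × String))) (out : List String × (List (List (List (String × String))))) : Prop := out = grouping_1st_layer_alt target_dict_list
instance (target_dict_list : List (List (String × String))) (out : List String × (List (List (List (String × String))))) : Decidable (Spec_grouping_1st_layer target_dict_list out) := by unfold Spec_grouping_1st_layer; infer_instance

-- ===== CLAIM (what is proved, stated in full; the proofs are below) =====
def Claim_equal_grouping_1st_layer : Prop := ∀ (target_dict_list : List (List (String × String))), Dom_grouping_1st_layer target_dict_list → Pre_grouping_1st_layer target_dict_list → Spec_grouping_1st_layer target_dict_list (grouping_1st_layer target_dict_list)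

-- ===== LEMMAS AND PROOFS =====

-- the common mathematical object: the list of marker-delimited blocks of l (prefix before the first marker dropped)
def pvG {α : Type} (m : α → Bool) : List α → List (List α)
  | [] => []
  | x :: t =>
      if m x then (x :: t.takeWhile (fun y => !m y)) :: pvG m (t.dropWhile (fun y => !m y))
      else pvG m t
termination_by l => l.length
decreasing_by
  · simpa using Nat.lt_succ_of_le (List.length_dropWhile_le _ _)
  · simp

-- marker positions of l, in increasing order
def pvIdx {α : Type} (m : α → Bool) : List α → List Nat
  | [] => []
  | x :: t => if m x then 0 :: (pvIdx m t).map (· + 1) else (pvIdx m t).map (· + 1)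

theorem pvG_dropWhile {α : Type} (m : α → Bool) (l : List α) :
    pvG m (l.dropWhile (fun y => !m y)) = pvG m l := by
  induction l with
  | nil => simp
  | cons x t ih =>
      by_cases hm : m x = true
      · simp [List.dropWhile, hm]
      · simp only [Bool.not_eq_true] at hm
        simp [List.dropWhile, hm, ih, pvG]

theorem pvL1 {α : Type} (m : α → Bool) (l : List α) (s : Int) :
    ((PySem.List.enumerate (l.map m) s).filter (fun p => p.2 == true)).map (fun p => p.1)
      = (pvIdx m l).map (fun k : Nat => s + (k : Int)) := by
  induction l generalizing s with
  | nil => rfl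
  | cons x t ih =>
      have step : ((pvIdx m t).map (· + 1)).map (fun k : Nat => s + (k : Int))
          = (pvIdx m t).map (fun k : Nat => (s + 1) + (k : Int)) := by
        rw [List.map_map]
        apply List.map_congr_left
        intro k _
        show s + ((k + 1 : Nat) : Int) = (s + 1) + (k : Int)
        push_cast
        ring
      rw [List.map_cons, PySem.List.enumerate_cons, List.filter_cons]
      by_cases hm : m x = true
      · rw [hm]
        show (((s, true) : Int × Bool) :: (PySem.List.enumerate (t.map m) (s + 1)).filter (fun p => p.2 == true)).map (fun p => p.1) = _
        rw [List.map_cons, ih]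
        simp only [pvIdx, hm, if_true, List.map_cons, ← step]
        norm_num
      · simp only [Bool.not_eq_true] at hm
        rw [hm]
        show ((PySem.List.enumerate (t.map m) (s + 1)).filter (fun p => p.2 == true)).map (fun p => p.1) = _
        rw [ih]
        simp only [pvIdx, hm, Bool.false_eq_true, if_false]
        exact step.symm

theorem pvL2 {α : Type} (g : Int → Int → α) (js : List Int) :
    (PySem.List.pyRange 0 ((js.length : Int) - 1) 1).map
        (fun i => g (PySem.List.pyGetD js i 0) (PySem.List.pyGetD js (i + 1) 0))
      = List.zipWith g js js.tail := by
  cases js with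
  | nil => simp [PySem.List.pyRange_one_eq_nil]
  | cons a rest =>
      have hlen : ((a :: rest).length : Int) - 1 = (rest.length : Int) := by
        simp
      rw [hlen]
      apply List.ext_getElem
      · simp [PySem.List.length_pyRange_one]
      · intro k h1 h2
        have hk : k < rest.length := by
          simpa [PySem.List.length_pyRange_one] using h1
        simp only [List.getElem_map, List.getElem_zipWith]
        rw [PySem.List.getElem_pyRange_one]
        rw [show ((0 : Int) + (k : Int)) = ((k : Nat) : Int) by ring]
        rw [show ((k : Nat) : Int) + 1 = ((k + 1 : Nat) : Int) by push_cast; ring]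
        rw [PySem.List.pyGetD_natCast, PySem.List.pyGetD_natCast]
        rw [List.getD_eq_getElem _ _ (by simp; omega), List.getD_eq_getElem _ _ (by simp; omega)]
        congr 1

theorem pvL5 {α : Type} (m : α → Bool) (t : List α) :
    t.take ((pvIdx m t).head?.getD t.length) = t.takeWhile (fun y => !m y) := by
  induction t with
  | nil => simp
  | cons y t' ih =>
      by_cases hm : m y = true
      · simp [pvIdx, hm, List.takeWhile]
      · simp only [Bool.not_eq_true] at hm
        have hh : (pvIdx m (y :: t')).head?.getD (y :: t').length
            = ((pvIdx m t').head?.getD t'.length) + 1 := by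
          simp only [pvIdx, hm, Bool.false_eq_true, if_false]
          cases pvIdx m t' <;> simp
        rw [hh, List.take_succ_cons]
        simp [List.takeWhile, hm, ih]

theorem pvZipWith_congr {α β : Type} (f g : α → α → β) (l1 l2 : List α)
    (h : ∀ a b, f a b = g a b) : List.zipWith f l1 l2 = List.zipWith g l1 l2 := by
  simp [funext fun a => funext fun b => h a b]

theorem pvL4 {α : Type} (x : α) (t : List α) (ns : List Nat) :
    List.zipWith (fun a b : Nat => ((x :: t).drop a).take (b - a)) (ns.map (· + 1)) ((ns.map (· + 1)).tail)
      = List.zipWith (fun a b : Nat => (t.drop a).take (b - a)) ns ns.tail := by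
  rw [← List.map_tail, List.zipWith_map]
  apply pvZipWith_congr
  intro a b
  simp [Nat.add_sub_add_right]

theorem pvBlocks_eq_G {α : Type} (m : α → Bool) (l : List α) :
    List.zipWith (fun a b : Nat => (l.drop a).take (b - a))
        (pvIdx m l ++ [l.length]) ((pvIdx m l ++ [l.length]).tail)
      = pvG m l := by
  induction l with
  | nil => simp [pvIdx, pvG]
  | cons x t ih =>
      by_cases hm : m x = true
      · have hns : pvIdx m (x :: t) ++ [(x :: t).length]
            = 0 :: ((pvIdx m t ++ [t.length]).map (· + 1)) := by
          simp [pvIdx, hm]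
        obtain ⟨j, ms', hms⟩ : ∃ j ms', (pvIdx m t ++ [t.length]).map (· + 1) = j :: ms' := by
          cases h : (pvIdx m t ++ [t.length]).map (· + 1) with
          | nil => simp at h
          | cons a b => exact ⟨a, b, rfl⟩
        have hj : j = (pvIdx m t).head?.getD t.length + 1 := by
          cases hpi : pvIdx m t with
          | nil => rw [hpi] at hms; simp at hms ⊢; omega
          | cons a l' => rw [hpi] at hms; simp at hms ⊢; omega
        rw [hns, hms]
        show ((x :: t).drop 0).take (j - 0)
            :: List.zipWith (fun a b : Nat => ((x :: t).drop a).take (b - a)) (j :: ms') ms' = _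
        have hzip : List.zipWith (fun a b : Nat => ((x :: t).drop a).take (b - a)) (j :: ms') ms'
            = pvG m t := by
          have h4 := pvL4 x t (pvIdx m t ++ [t.length])
          rw [hms] at h4
          rw [ih] at h4
          simpa using h4
        rw [hzip]
        have hfirst : ((x :: t).drop 0).take (j - 0) = x :: t.takeWhile (fun y => !m y) := by
          rw [hj]
          simp [List.take_succ_cons, pvL5]
        rw [hfirst]
        conv_rhs => rw [pvG]
        simp [hm, pvG_dropWhile]
      · simp only [Bool.not_eq_true] at hm
        have hns : pvIdx m (x :: t) ++ [(x :: t).length]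
            = (pvIdx m t ++ [t.length]).map (· + 1) := by
          simp [pvIdx, hm]
        rw [hns, pvL4, ih]
        conv_rhs => rw [pvG]
        simp [hm]

-- ===== B-side =====
def pvFoldS {α : Type} (m : α → Bool) (l : List α)
    (st : List (List α) × List α × Bool) : List (List α) × List α × Bool :=
  l.foldl (fun st x =>
    if m x then ((if st.2.2 then st.1 ++ [st.2.1] else st.1), [x], true)
    else if st.2.2 then (st.1, st.2.1 ++ [x], st.2.2)
    else st) st

def pvFin {α : Type} (st : List (List α) × List α × Bool) : List (List α) :=
  if st.2.2 then st.1 ++ [st.2.1] else st.1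

theorem pvFoldS_cons {α : Type} (m : α → Bool) (x : α) (l : List α)
    (st : List (List α) × List α × Bool) :
    pvFoldS m (x :: l) st
      = pvFoldS m l (if m x then ((if st.2.2 then st.1 ++ [st.2.1] else st.1), [x], true)
          else if st.2.2 then (st.1, st.2.1 ++ [x], st.2.2) else st) := rfl

theorem pvB1 {α : Type} (sol m : α → Bool) (tdl : List α) (o : List α)
    (bs : List (List α)) (c : List α) (s : Bool) :
    tdl.foldl (fun (st : List α × List (List α) × List α × Bool) x =>
        if !sol x then (st.1 ++ [x], st.2.1, st.2.2.1, st.2.2.2)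
        else if m x then (st.1, (if st.2.2.2 then st.2.1 ++ [st.2.2.1] else st.2.1), [x], true)
        else if st.2.2.2 then (st.1, st.2.1, st.2.2.1 ++ [x], st.2.2.2)
        else st) (o, bs, c, s)
      = (o ++ tdl.filter (fun x => !sol x), pvFoldS m (tdl.filter sol) (bs, c, s)) := by
  induction tdl generalizing o bs c s with
  | nil => simp [pvFoldS]
  | cons x t ih =>
      rw [List.foldl_cons, List.filter_cons, List.filter_cons]
      by_cases hs : sol x = true
      · by_cases hm : m x = true
        · simp only [hs, hm, if_true]
          rw [ih, pvFoldS_cons]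
          simp [hm]
        · simp only [Bool.not_eq_true] at hm
          simp only [hs, hm, Bool.false_eq_true, if_false, if_true]
          rw [ih, pvFoldS_cons]
          by_cases hst : s = true
          · simp [hm, hst]
          · simp only [Bool.not_eq_true] at hst
            simp [hm, hst]
      · simp only [Bool.not_eq_true] at hs
        simp only [hs, Bool.false_eq_true, if_false]
        rw [ih]
        simp

theorem pvB2 {α : Type} (m : α → Bool) (l : List α) (bs : List (List α)) (c : List α) :
    pvFin (pvFoldS m l (bs, c, true))
      = bs ++ (c ++ l.takeWhile (fun y => !m y)) :: pvG m (l.dropWhile (fun y => !m y)) := by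
  induction l generalizing bs c with
  | nil => simp [pvFoldS, pvFin, pvG]
  | cons y t ih =>
      by_cases hm : m y = true
      · rw [pvFoldS_cons]
        simp only [hm, if_true]
        rw [ih]
        simp [List.takeWhile, List.dropWhile, hm, pvG]
      · simp only [Bool.not_eq_true] at hm
        rw [pvFoldS_cons]
        simp only [hm, Bool.false_eq_true, if_false, if_true]
        rw [ih]
        simp [List.takeWhile, List.dropWhile, hm]

theorem pvB3 {α : Type} (m : α → Bool) (l : List α) (bs : List (List α)) (c : List α) :
    pvFin (pvFoldS m l (bs, c, false)) = bs ++ pvG m l := by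
  induction l generalizing bs c with
  | nil => simp [pvFoldS, pvFin, pvG]
  | cons y t ih =>
      by_cases hm : m y = true
      · rw [pvFoldS_cons]
        simp only [hm, if_true, Bool.false_eq_true, if_false]
        rw [pvB2]
        conv_rhs => rw [pvG]
        simp [hm]
      · simp only [Bool.not_eq_true] at hm
        rw [pvFoldS_cons]
        simp only [hm, Bool.false_eq_true, if_false]
        rw [ih]
        conv_rhs => rw [pvG]
        simp [hm]

-- A's block construction equals pvG on the solver list
theorem pvA_blocks (l : List (List (String × String))) :
    (PySem.List.pyRange 0 ((((((PySem.List.enumerate (l.map pvIsMarker) 0).filter (fun p => p.2 == true)).map (fun p => p.1) ++ [((l.map pvIsMarker).length : Int)]).length : Int) - 1)) 1).map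
        (fun i => PySem.List.slice l
          (some (PySem.List.pyGetD (((PySem.List.enumerate (l.map pvIsMarker) 0).filter (fun p => p.2 == true)).map (fun p => p.1) ++ [((l.map pvIsMarker).length : Int)]) i 0))
          (some (PySem.List.pyGetD (((PySem.List.enumerate (l.map pvIsMarker) 0).filter (fun p => p.2 == true)).map (fun p => p.1) ++ [((l.map pvIsMarker).length : Int)]) (i + 1) 0)))
      = pvG pvIsMarker l := by
  rw [pvL2 (fun a b => PySem.List.slice l (some a) (some b))
        (((PySem.List.enumerate (l.map pvIsMarker) 0).filter (fun p => p.2 == true)).map (fun p => p.1) ++ [((l.map pvIsMarker).length : Int)])]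
  have hjs : ((PySem.List.enumerate (l.map pvIsMarker) 0).filter (fun p => p.2 == true)).map (fun p => p.1) ++ [((l.map pvIsMarker).length : Int)]
      = (pvIdx pvIsMarker l ++ [l.length]).map (fun k : Nat => (k : Int)) := by
    rw [pvL1]
    simp
  rw [hjs, ← List.map_tail, List.zipWith_map]
  have hsl : ∀ a b : Nat, PySem.List.slice l (some (a : Int)) (some (b : Int)) = (l.drop a).take (b - a) :=
    fun a b => PySem.List.slice_natCast l a b
  rw [pvZipWith_congr _ _ _ _ hsl]
  exact pvBlocks_eq_G pvIsMarker l

-- ===== VERDICT (by name: the statement is the Claim_ definition above) =====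
theorem grouping_1st_layer_spec : Claim_equal_grouping_1st_layer := by
  intro tdl _ _
  unfold Spec_grouping_1st_layer grouping_1st_layer grouping_1st_layer_alt
  rw [pvB1 pvIsSolver pvIsMarker tdl [] [] [] false]
  have hB : (if (pvFoldS pvIsMarker (tdl.filter pvIsSolver) ([], [], false)).2.2
        then (pvFoldS pvIsMarker (tdl.filter pvIsSolver) ([], [], false)).1 ++ [(pvFoldS pvIsMarker (tdl.filter pvIsSolver) ([], [], false)).2.1]
        else (pvFoldS pvIsMarker (tdl.filter pvIsSolver) ([], [], false)).1)
      = pvG pvIsMarker (tdl.filter pvIsSolver) := by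
    have := pvB3 pvIsMarker (tdl.filter pvIsSolver) [] []
    simpa [pvFin] using this
  have hA := pvA_blocks (tdl.filter pvIsSolver)
  simp only []
  rw [hA, hB]
  simp
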